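-- pv_equiv track=rewrite | github.com/hyxsbri/cd_repo | programmers/수학/for문_과일 장수.py | solution
-- ===== SOURCE A (Python) =====
-- def solution(k, m, score):
--     ans = 0
--     score.sort(reverse=True)
--
--     for i in range(0, len(score), m):
--         temp = score[i:i+m]
--         if len(temp) == m:
--             ans += min(temp)*m
--
--
--     return ans
-- ===== SOURCE B (Python) =====
-- def solution(k, m, score):
--     # Sort in place (descending) like A, then: every full box's minimum is the
--     # last element of its group, i.e. score[m-1], score[2m-1], ... — sum those
--     # minima via one strided slice instead of chunking and calling min().
--     score.sort(reverse=True)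
--     return m * sum(score[m-1::m])
-- ===== Notes on version B (the rewrite author's own statement) =====
-- stated objective: simpler
-- what changed: Replaces the chunking loop (slice each group, test its length, take its min) by a closed-form strided slice: after the same in-place descending sort, the minima of the full groups are exactly score[m-1::m], so B returns m * sum(score[m-1::m]) with no loop, no min() and no length guard.
-- outside the precondition, e.g. on solution(0, -1, [3, 1, 2]): A returns 0, B returns -5
import Mathlib
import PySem

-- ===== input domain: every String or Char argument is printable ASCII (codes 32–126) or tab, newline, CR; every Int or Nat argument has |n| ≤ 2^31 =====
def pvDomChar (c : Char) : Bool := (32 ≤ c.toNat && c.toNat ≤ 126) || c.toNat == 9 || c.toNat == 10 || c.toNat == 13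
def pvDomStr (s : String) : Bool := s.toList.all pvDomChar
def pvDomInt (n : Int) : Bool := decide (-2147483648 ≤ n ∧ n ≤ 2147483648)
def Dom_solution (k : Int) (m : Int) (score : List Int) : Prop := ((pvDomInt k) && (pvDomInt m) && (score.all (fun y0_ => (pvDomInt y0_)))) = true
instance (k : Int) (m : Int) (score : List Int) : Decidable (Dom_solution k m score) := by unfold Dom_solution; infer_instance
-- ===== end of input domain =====

-- ===== PORT A =====
-- B computes the same total via one strided slice instead of A's chunk-and-min loop (objective: simpler).
-- A sorts `score` in place (score.sort(reverse=True)); B performs the same mutation; the equivalence proved here is about the return value.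
def solution (k : Int) (m : Int) (score : List Int) : Int :=
  let s := PySem.List.sorted score (fun x => x) true
  (PySem.List.pyRange 0 (s.length : Int) m).foldl
    (fun ans i =>
      let temp := PySem.List.slice s (some i) (some (i + m))
      if (temp.length : Int) = m then ans + (PySem.List.min? temp (fun x => x)).getD 0 * m
      else ans)
    0

-- ===== PORT B =====
def solution_alt (k : Int) (m : Int) (score : List Int) : Int :=
  let s := PySem.List.sorted score (fun x => x) true
  m * ((PySem.List.slice? s (some (m - 1)) none m).getD []).sum

-- ===== PRECONDITION & SPEC =====
-- Pre_ excludes m = 0, on which A raises ValueError (range() step 0), and negative m,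
-- which is outside the natural domain of a box size (A returns 0 there only because
-- range(0, n, m) happens to be empty for negative m).
def Pre_solution (k : Int) (m : Int) (score : List Int) : Prop := 1 <= m
instance (k : Int) (m : Int) (score : List Int) : Decidable (Pre_solution k m score) := by unfold Pre_solution; infer_instance
def pvWitness_solution : Int × Int × List Int := (4, 3, [4, 1, 2, 5, 3, 2, 1])
def Spec_solution (k : Int) (m : Int) (score : List Int) (out : Int) : Prop := out = solution_alt k m score
instance (k : Int) (m : Int) (score : List Int) (out : Int) : Decidable (Spec_solution k m score out) := by unfold Spec_solution; infer_instance

-- ===== CLAIM (what is proved, stated in full; the proofs are below) =====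
def Claim_equal_solution : Prop := ∀ (k : Int) (m : Int) (score : List Int), Dom_solution k m score → Pre_solution k m score → Spec_solution k m score (solution k m score)

-- ===== LEMMAS AND PROOFS =====

lemma last_le (l : List Int) (hp : l.Pairwise (fun a b : Int => b ≤ a)) (h : l ≠ []) :
    ∀ y ∈ l, l.getLast h ≤ y := by
  induction l with
  | nil => simp at h
  | cons a t ih =>
    intro y hy
    rcases List.pairwise_cons.mp hp with ⟨ha, ht⟩
    cases t with
    | nil => simp at hy; simp [hy]
    | cons b u =>
      rw [List.getLast_cons (by simp)]
      rcases List.mem_cons.mp hy with rfl | hy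
      · exact ha _ (List.getLast_mem (by simp))
      · exact ih ht (by simp) _ hy

lemma min_desc (l : List Int) (h : l ≠ []) (hp : l.Pairwise (fun a b : Int => b ≤ a)) :
    (PySem.List.min? l (fun x => x)).getD 0 = l.getLast h := by
  obtain ⟨v, hv⟩ : ∃ v, PySem.List.min? l (fun x => x) = some v := by
    cases hm : PySem.List.min? l (fun x => x) with
    | none => exact absurd ((PySem.List.min?_eq_none_iff l _).mp hm) h
    | some v => exact ⟨v, rfl⟩
  rw [hv]
  have h1 : v ≤ l.getLast h := PySem.List.min?_isMin hv _ (List.getLast_mem h)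
  have h2 : l.getLast h ≤ v := last_le l hp h _ (PySem.List.min?_mem hv)
  simpa using le_antisymm h1 h2

lemma chunk_min (s : List Int) (hs : s.Pairwise (fun a b : Int => b ≤ a)) (a mn : Nat)
    (h1 : 1 ≤ mn) (hle : a + mn ≤ s.length) :
    (PySem.List.min? ((s.drop a).take mn) (fun x => x)).getD 0 = s[a + mn - 1]?.getD 0 := by
  have hlen : ((s.drop a).take mn).length = mn := by
    simp [List.length_take, List.length_drop]; omega
  have hne : (s.drop a).take mn ≠ [] := by
    intro h0; rw [h0] at hlen; simp at hlen; omega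
  have hsub : ((s.drop a).take mn).Sublist s :=
    (List.take_sublist _ _).trans (List.drop_sublist _ _)
  rw [min_desc _ hne (hs.sublist hsub)]
  rw [List.getLast_eq_getElem]
  have hidx : a + mn - 1 < s.length := by omega
  rw [List.getElem?_eq_getElem hidx]
  simp [hlen, List.getElem_take, List.getElem_drop]
  congr 1
  omega

lemma foldl_if_add {β : Type} (l : List β) (c : β → Prop) [DecidablePred c] (g : β → Int) (a : Int) :
    l.foldl (fun ans j => if c j then ans + g j else ans) a
      = a + (l.map (fun j => if c j then g j else 0)).sum := by
  have h : (fun (ans : Int) j => if c j then ans + g j else ans)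
      = (fun (ans : Int) j => ans + if c j then g j else 0) := by
    funext ans j; split <;> simp
  rw [h, PySem.List.foldl_add]

lemma b_slice (s : List Int) (mn : Nat) (hmn : 1 ≤ mn) :
    (PySem.List.slice? s (some ((mn : Int) - 1)) none (mn : Int)).getD []
      = (List.range (s.length / mn)).filterMap
          (fun (j : Nat) => s[(((mn:Int) - 1) + (mn:Int)*(j:Int)).toNat]?) := by
  have hstep : ((mn:Int)) ≠ 0 := by exact_mod_cast Nat.one_le_iff_ne_zero.mp hmn
  have hnneg : ¬ ((mn:Int) < 0) := by omega
  have hm1 : ¬ ((mn:Int) - 1 < 0) := by omega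
  simp only [PySem.List.slice?, PySem.List.sliceIndices, if_neg hstep, if_neg hnneg, if_neg hm1]
  rcases le_or_gt ((mn:Int) - 1) (s.length:Int) with hcase | hcase
  · rw [min_eq_left hcase, if_pos (by omega : (0:Int) < mn)]
    by_cases hlt : (mn:Int) - 1 < (s.length:Int)
    · rw [if_pos hlt]
      have harith : ((s.length:Int) - ((mn:Int) - 1) + (mn:Int) - 1) = (s.length:Int) := by ring
      rw [harith]
      have hq : (((s.length:Int)) / (mn:Int)).toNat = s.length / mn := by
        exact Nat.add_zero (s.length.div mn)
      rw [hq, Option.getD_some]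
    · rw [if_neg hlt]
      have h0 : s.length / mn = 0 := Nat.div_eq_of_lt (by omega)
      simp [h0]
  · rw [min_eq_right (le_of_lt hcase), if_pos (by omega : (0:Int) < mn), if_neg (lt_irrefl _)]
    have h0 : s.length / mn = 0 := Nat.div_eq_of_lt (by omega)
    simp [h0]

lemma filterMap_get (s : List Int) (mn : Nat) (hmn : 1 ≤ mn) :
    (List.range (s.length / mn)).filterMap
        (fun (j : Nat) => s[(((mn:Int) - 1) + (mn:Int)*(j:Int)).toNat]?)
      = (List.range (s.length / mn)).map (fun (j : Nat) => s[mn*j + mn - 1]?.getD 0) := by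
  rw [← List.filterMap_eq_map]
  apply List.filterMap_congr
  intro j hj
  rw [List.mem_range] at hj
  have ha : mn*(j+1) ≤ mn*(s.length/mn) := Nat.mul_le_mul_left _ hj
  have hb : mn*(s.length/mn) ≤ s.length := by
    rw [mul_comm]; exact Nat.div_mul_le_self _ _
  have hx : mn*(j+1) = mn*j + mn := by ring
  have hidx : mn*j + mn - 1 < s.length := by omega
  have hnat : (((mn:Int) - 1) + (mn:Int)*(j:Int)).toNat = mn*j + mn - 1 := by
    have h3 : ((mn*j + mn - 1 : Nat) : Int) = ((mn*j : Nat) : Int) + ((mn : Nat) : Int) - 1 := by omega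
    have h2 : ((mn*j + mn - 1 : Nat) : Int) = (mn:Int) - 1 + (mn:Int)*(j:Int) := by
      rw [h3]; push_cast; ring
    rw [← h2, Int.toNat_natCast]
  rw [hnat, List.getElem?_eq_getElem hidx]
  simp [List.getElem?_eq_getElem hidx]

lemma key (mn : Nat) (hmn : 1 ≤ mn) (s : List Int) (hs : s.Pairwise (fun a b : Int => b ≤ a)) :
    (PySem.List.pyRange 0 (s.length : Int) (mn:Int)).foldl
      (fun ans i =>
        if (((PySem.List.slice s (some i) (some (i + (mn:Int)))).length : Int) = (mn:Int))
        then ans + (PySem.List.min? (PySem.List.slice s (some i) (some (i + (mn:Int)))) (fun x => x)).getD 0 * (mn:Int)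
        else ans) 0
    = (mn:Int) * ((PySem.List.slice? s (some ((mn:Int) - 1)) none (mn:Int)).getD []).sum := by
  rw [b_slice s mn hmn, filterMap_get s mn hmn]
  rw [PySem.List.pyRange_of_pos _ _ (by omega : (0:Int) < (mn:Int)), List.foldl_map]
  rw [foldl_if_add (List.range _)
      (fun (j : Nat) => (((PySem.List.slice s (some (0 + (mn:Int) * (j:Int))) (some (0 + (mn:Int) * (j:Int) + (mn:Int)))).length : Int) = (mn:Int)))
      (fun (j : Nat) => (PySem.List.min? (PySem.List.slice s (some (0 + (mn:Int) * (j:Int))) (some (0 + (mn:Int) * (j:Int) + (mn:Int)))) (fun x => x)).getD 0 * (mn:Int)) 0]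
  rw [zero_add]
  have hmap : ∀ j ∈ List.range (if (0:Int) < (s.length:Int) then (((s.length:Int) - 0 + (mn:Int) - 1) / (mn:Int)).toNat else 0),
      (if (((PySem.List.slice s (some (0 + (mn:Int) * (j:Int))) (some (0 + (mn:Int) * (j:Int) + (mn:Int)))).length : Int) = (mn:Int))
       then (PySem.List.min? (PySem.List.slice s (some (0 + (mn:Int) * (j:Int))) (some (0 + (mn:Int) * (j:Int) + (mn:Int)))) (fun x => x)).getD 0 * (mn:Int)
       else 0)
      = (if mn*j + mn ≤ s.length then s[mn*j + mn - 1]?.getD 0 * (mn:Int) else 0) := by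
    intro j _
    have e1 : (0 + (mn:Int) * (j:Int)) = ((mn*j : Nat) : Int) := by push_cast; ring
    have e2 : (0 + (mn:Int) * (j:Int) + (mn:Int)) = ((mn*j : Nat) : Int) + ((mn : Nat) : Int) := by push_cast; ring
    rw [e2, e1, PySem.List.slice_natCast_add]
    have hlen : ((s.drop (mn*j)).take mn).length = min mn (s.length - mn*j) := by
      simp [List.length_take, List.length_drop]
    by_cases hc : mn*j + mn ≤ s.length
    · rw [if_pos (by rw [hlen]; omega), if_pos hc, chunk_min s hs (mn*j) mn hmn hc]
    · rw [if_neg (by rw [hlen]; omega), if_neg hc]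
  rw [List.map_congr_left hmap]
  -- name the counts
  by_cases hpos : (0:Int) < (s.length:Int)
  case neg =>
    have h0 : s.length = 0 := by omega
    simp [h0]
  case pos =>
    rw [if_pos hpos]
    have hC : (((s.length:Int) - 0 + (mn:Int) - 1) / (mn:Int)).toNat = (s.length + mn - 1) / mn := by
      have h3 : ((s.length:Int) - 0 + (mn:Int) - 1) = ((s.length + mn - 1 : Nat) : Int) := by omega
      rw [h3]
      exact Nat.add_zero _
    rw [hC]
    have hq : s.length / mn ≤ (s.length + mn - 1) / mn := Nat.div_le_div_right (by omega)
    have hsplit : (s.length + mn - 1) / mn = s.length / mn + ((s.length + mn - 1) / mn - s.length / mn) := by omega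
    rw [hsplit, List.range_add, List.map_append, List.sum_append, List.map_map]
    have htail : (List.map ((fun a => if mn * a + mn ≤ s.length then s[mn * a + mn - 1]?.getD 0 * (mn:Int) else 0) ∘ (fun x => s.length / mn + x)) (List.range ((s.length + mn - 1) / mn - s.length / mn))).sum = 0 := by
      apply List.sum_eq_zero
      intro x hx
      simp only [List.mem_map, List.mem_range, Function.comp] at hx
      obtain ⟨i, hi, rfl⟩ := hx
      rw [if_neg]
      intro hcon
      have h4 : (s.length / mn + i + 1) * mn ≤ s.length := by
        have h5 : (s.length / mn + i + 1) * mn = mn*(s.length / mn + i) + mn := by ring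
        omega
      have h5 : s.length / mn + i + 1 ≤ s.length / mn := (Nat.le_div_iff_mul_le (by omega)).mpr h4
      omega
    rw [htail, add_zero]
    have hhead : ∀ j ∈ List.range (s.length / mn),
        (if mn*j + mn ≤ s.length then s[mn*j + mn - 1]?.getD 0 * (mn:Int) else 0)
        = s[mn*j + mn - 1]?.getD 0 * (mn:Int) := by
      intro j hj
      rw [List.mem_range] at hj
      rw [if_pos]
      have h4 : (j+1) * mn ≤ s.length := (Nat.le_div_iff_mul_le (by omega)).mp hj
      have : (j+1) * mn = mn*j + mn := by ring
      omega
    rw [List.map_congr_left hhead]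
    rw [List.sum_map_mul_right, mul_comm]

-- ===== VERDICT (by name: the statement is the Claim_ definition above) =====
theorem solution_spec : Claim_equal_solution := by
  intro k m score _ hpre
  unfold Pre_solution at hpre
  unfold Spec_solution solution solution_alt
  obtain ⟨mn, rfl⟩ : ∃ mn : Nat, m = (mn:Int) := ⟨m.toNat, by omega⟩
  have hmn : 1 ≤ mn := by exact_mod_cast hpre
  exact key mn hmn _ (by simpa using PySem.List.sorted_pairwise_rev score (fun x => x))
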